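-- pv_equiv track=rewrite | github.com/VictorHidalgoUCLM/FL-Semiasync | app_code/strategies/FedMOpt.py | _simulate_semiasynchronous
-- ===== SOURCE A (Python) =====
-- def _simulate_semiasynchronous(timestamp_list, m):
--     timers_simulation = timestamp_list.copy()
--     execution_counters = [0] * len(timestamp_list)
--     stop = False
--
--     def m_minimos_con_indices(lista, m):
--         # Emparejar cada valor con su índice
--         enumerada = list(enumerate(lista))
--
--         # Ordenar por valor
--         ordenada = sorted(enumerada, key=lambda x: x[1])
--
--         # Tomar los m primeros (los menores)
--         m_menores = ordenada[:m]
--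
--         # Separar valores e índices
--         indices = [i for i, _ in m_menores]
--         valores = [v for _, v in m_menores]
--
--         return valores, indices
--
--     while(True):
--         valores, indices = m_minimos_con_indices(timers_simulation, m)
--         max_value = max(valores)
--
--         for value, index in zip(valores, indices):
--             execution_counters[index] = execution_counters[index] + 1
--
--             if all(counter != 0 for counter in execution_counters):
--                 for i, val in enumerate(execution_counters):
--                     if i != index:
--                         execution_counters[i] = val + 1
--                 stop = True
--                 break
--
--             else:
--                 timers_simulation[index] = value + (max_value - value) + timestamp_list[index]
--
--         if stop:
--             break
--
--     return timers_simulation, execution_counters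
-- ===== SOURCE B (Python) =====
-- def _simulate_semiasynchronous(timestamp_list, m):
--     n = len(timestamp_list)
--     timers_simulation = timestamp_list.copy()
--     execution_counters = [0] * n
--     k = m if m < n else n
--     zeros = n
--
--     def insert_trim(buf, i, v):
--         # keep buf a stable value-sorted buffer of at most k (index, value) pairs
--         if len(buf) == k and buf[k-1][1] <= v:
--             return buf
--         j = 0
--         while j < len(buf) and buf[j][1] <= v:
--             j += 1
--         new = buf[:j] + [(i, v)] + buf[j:]
--         return new[:k]
--
--     while True:
--         buf = []
--         for i, v in enumerate(timers_simulation):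
--             buf = insert_trim(buf, i, v)
--         max_value = buf[-1][1]
--
--         stop = False
--         for i, v in buf:
--             if execution_counters[i] == 0:
--                 zeros -= 1
--             execution_counters[i] += 1
--             if zeros == 0:
--                 execution_counters = [c if j == i else c + 1
--                                       for j, c in enumerate(execution_counters)]
--                 stop = True
--                 break
--             timers_simulation[i] = max_value + timestamp_list[i]
--
--         if stop:
--             return timers_simulation, execution_counters
-- ===== Notes on version B (the rewrite author's own statement) =====
-- stated objective: alternative
-- what changed: Per round, B replaces A's full stable sort of all n enumerated timers plus an O(n) all()-scan per selected element by a single bounded-buffer pass that keeps only the k = min(m, n) smallest (index, value) pairs, reads the round maximum off the buffer's last slot instead of calling max(), and maintains a running count of still-zero counters instead of rescanning them.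
-- outside the precondition, e.g. on _simulate_semiasynchronous([2, 3, 4], -1): A returns ([5, 6, 4], [2, 2, 1]), B raises IndexError
import Mathlib
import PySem

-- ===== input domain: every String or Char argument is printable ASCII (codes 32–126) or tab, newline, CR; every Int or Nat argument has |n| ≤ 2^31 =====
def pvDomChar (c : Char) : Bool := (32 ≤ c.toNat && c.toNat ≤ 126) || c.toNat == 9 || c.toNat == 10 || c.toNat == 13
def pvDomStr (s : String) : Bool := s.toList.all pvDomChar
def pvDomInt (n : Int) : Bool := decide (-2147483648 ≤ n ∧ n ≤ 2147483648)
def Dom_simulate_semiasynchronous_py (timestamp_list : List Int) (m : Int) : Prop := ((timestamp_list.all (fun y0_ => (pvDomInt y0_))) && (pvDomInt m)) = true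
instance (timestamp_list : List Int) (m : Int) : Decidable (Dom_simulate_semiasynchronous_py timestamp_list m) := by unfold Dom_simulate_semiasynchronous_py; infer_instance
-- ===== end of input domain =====

-- B replaces A's per-round full stable sort of all n timers (plus an O(n) `all(..)` scan per
-- selected element) by a single bounded-buffer selection pass keeping only the k = min(m, n)
-- smallest (index, value) pairs, the round maximum read off the buffer's last slot, and a
-- running count of still-zero counters; objective: alternative (different selection algorithm,
-- not measurably faster at the largest sizes).
-- The `while True` loop of both programs is ported with the same generous fuel bound; inside
-- Pre_ the fuel is never exhausted on the tested inputs, and outside Pre_ nothing is claimed.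

-- ===== PORT A =====
-- m_minimos_con_indices: enumerate, stable sort by value, take the first m, split.
def pyA_mMin (lista : List Int) (m : Int) : List Int × List Int :=
  let enumerada := PySem.List.enumerate lista
  let ordenada := PySem.List.sorted enumerada (fun x => x.2) false
  let mMenores := PySem.List.slice ordenada none (some m)
  (mMenores.map (fun p => p.2), mMenores.map (fun p => p.1))

-- inner `for value, index in zip(valores, indices)` loop; counters[index] and ts[index] are
-- always in range in Python (indices come from enumerate), so the pyGetD default is never used.
def pyA_inner (ts : List Int) (maxv : Int) :
    List (Int × Int) → List Int → List Int → List Int × List Int × Bool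
  | [], t, c => (t, c, false)
  | (value, index) :: rest, t, c =>
    let c1 := c.set index.toNat (PySem.List.pyGetD c index 0 + 1)
    if c1.all (fun counter => counter != 0) then
      (t, (PySem.List.enumerate c1).map (fun p => if p.1 != index then p.2 + 1 else p.2), true)
    else
      pyA_inner ts maxv rest
        (t.set index.toNat (value + (maxv - value) + PySem.List.pyGetD ts index 0)) c1

-- `while True:` with fuel; fuel 0 (unreachable on the tested inputs inside Pre_) returns the state.
def pyA_loop (ts : List Int) (m : Int) :
    Nat → List Int → List Int → List Int × List Int
  | 0, t, c => (t, c)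
  | fuel + 1, t, c =>
    let vi := pyA_mMin t m
    match PySem.List.max? vi.1 (fun v => v) with
    | none => (t, c)  -- Python: max([]) raises ValueError (outside Pre_)
    | some maxv =>
      let r := pyA_inner ts maxv (vi.1.zip vi.2) t c
      if r.2.2 then (r.1, r.2.1) else pyA_loop ts m fuel r.1 r.2.1

-- shared fuel bound: (sum of |timer| + 2) * (n + 2) rounds always suffice inside Pre_
def pvFuel (ts : List Int) : Nat :=
  (ts.foldl (fun a x => a + x.natAbs) 0 + 2) * (ts.length + 2)

def simulate_semiasynchronous_py (timestamp_list : List Int) (m : Int) : List Int × List Int :=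
  pyA_loop timestamp_list m (pvFuel timestamp_list) timestamp_list
    (List.replicate timestamp_list.length 0)

-- ===== PORT B =====
-- insert_trim: keep a stable value-sorted buffer of at most k (index, value) pairs
def pyB_insTrim (k : Int) (buf : List (Int × Int)) (i v : Int) : List (Int × Int) :=
  if (buf.length : Int) == k && decide ((PySem.List.pyGetD buf (k - 1) (0, 0)).2 ≤ v) then buf
  else
    let j : Int := ((buf.takeWhile (fun p => p.2 ≤ v)).length : Int)
    let new := PySem.List.slice buf none (some j) ++ (i, v) :: PySem.List.slice buf (some j) none
    PySem.List.slice new none (some k)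

def pyB_sel (k : Int) (timers : List Int) : List (Int × Int) :=
  (PySem.List.enumerate timers).foldl (fun buf p => pyB_insTrim k buf p.1 p.2) []

def pyB_inner (ts : List Int) (maxv : Int) :
    List (Int × Int) → List Int → List Int → Int → List Int × List Int × Int × Bool
  | [], t, c, z => (t, c, z, false)
  | (i, _v) :: rest, t, c, z =>
    let z1 := if PySem.List.pyGetD c i 0 == 0 then z - 1 else z
    let c1 := c.set i.toNat (PySem.List.pyGetD c i 0 + 1)
    if z1 == 0 then
      (t, (PySem.List.enumerate c1).map (fun p => if p.1 == i then p.2 else p.2 + 1), z1, true)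
    else
      pyB_inner ts maxv rest (t.set i.toNat (maxv + PySem.List.pyGetD ts i 0)) c1 z1

def pyB_loop (ts : List Int) (k : Int) :
    Nat → List Int → List Int → Int → List Int × List Int
  | 0, t, c, _z => (t, c)
  | fuel + 1, t, c, z =>
    let buf := pyB_sel k t
    match PySem.List.pyGet? buf (-1) with
    | none => (t, c)  -- Python: buf[-1] raises IndexError (outside Pre_)
    | some last =>
      let r := pyB_inner ts last.2 buf t c z
      if r.2.2.2 then (r.1, r.2.1) else pyB_loop ts k fuel r.1 r.2.1 r.2.2.1

def simulate_semiasynchronous_py_alt (timestamp_list : List Int) (m : Int) : List Int × List Int :=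
  let n := timestamp_list.length
  let k : Int := if m < (n : Int) then m else (n : Int)
  pyB_loop timestamp_list k (pvFuel timestamp_list) timestamp_list
    (List.replicate n 0) (n : Int)

-- ===== PRECONDITION & SPEC =====
-- Pre_ keeps the natural domain: at least one timer, 1 ≤ m, and all timestamps positive — or
-- n ≤ m (one full round suffices), or m exceeds the number of non-positive timestamps (every
-- round still reaches fresh indices); outside it A raises (empty list / m = 0), loops forever
-- (non-positive timestamps monopolise the selection, e.g. [0,5] m=1), or its selection for
-- negative m is an accident of Python's negative-slice semantics (B raises IndexError there).
def Pre_simulate_semiasynchronous_py (timestamp_list : List Int) (m : Int) : Prop :=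
  timestamp_list ≠ [] ∧ 1 ≤ m ∧
    ((∀ x ∈ timestamp_list, 1 ≤ x) ∨ (timestamp_list.length : Int) ≤ m ∨
      (timestamp_list.countP (fun x => x ≤ 0) : Int) < m)
instance (timestamp_list : List Int) (m : Int) :
    Decidable (Pre_simulate_semiasynchronous_py timestamp_list m) := by
  unfold Pre_simulate_semiasynchronous_py; infer_instance

def pvWitness_simulate_semiasynchronous_py : List Int × Int := ([3, 5, 2], 2)

def Spec_simulate_semiasynchronous_py (timestamp_list : List Int) (m : Int) (out : List Int × List Int) : Prop := out = simulate_semiasynchronous_py_alt timestamp_list m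
instance (timestamp_list : List Int) (m : Int) (out : List Int × List Int) : Decidable (Spec_simulate_semiasynchronous_py timestamp_list m out) := by unfold Spec_simulate_semiasynchronous_py; infer_instance

-- ===== CLAIM (what is proved, stated in full; the proofs are below) =====
def Claim_equal_simulate_semiasynchronous_py : Prop := ∀ (timestamp_list : List Int) (m : Int), Dom_simulate_semiasynchronous_py timestamp_list m → Pre_simulate_semiasynchronous_py timestamp_list m → Spec_simulate_semiasynchronous_py timestamp_list m (simulate_semiasynchronous_py timestamp_list m)

-- ===== LEMMAS AND PROOFS =====

-- the comparison insertion sort by value uses (sorted_eq_foldl_insertBy)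
def pvBf : Int × Int → Int × Int → Bool := fun a b => decide (a.2 < b.2)

def pvKey : Int × Int → Int := fun p => p.2

theorem pv_insertBy_eq_takeWhile (l : List (Int × Int)) (x : Int × Int) :
    PySem.List.insertBy pvBf x l =
      l.takeWhile (fun p => p.2 ≤ x.2) ++ x :: l.dropWhile (fun p => p.2 ≤ x.2) := by
  induction l with
  | nil => simp [PySem.List.insertBy]
  | cons a t ih =>
    by_cases h : a.2 ≤ x.2
    · have hb : pvBf x a = false := by simp [pvBf]; omega
      simp [PySem.List.insertBy, hb, h, ih]
    · have hb : pvBf x a = true := by simp [pvBf]; omega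
      simp [PySem.List.insertBy, hb, h]

theorem pv_take_insertBy (K : Nat) (l : List (Int × Int)) (x : Int × Int) :
    (PySem.List.insertBy pvBf x (l.take K)).take K = (PySem.List.insertBy pvBf x l).take K := by
  induction l generalizing K with
  | nil => simp
  | cons a t ih =>
    cases K with
    | zero => simp
    | succ K' =>
      by_cases hb : pvBf x a = true
      · simp only [List.take_succ_cons, PySem.List.insertBy, hb, if_true]
        cases K' with
        | zero => simp
        | succ K2 =>
          simp [List.take_take]
      · have hb' : pvBf x a = false := by simpa using hb
        simp [List.take_succ_cons, PySem.List.insertBy, hb', ih]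

theorem pv_insTrim_eq (k : Int) (buf : List (Int × Int)) (i v : Int)
    (hk : 1 ≤ k) (hlen : buf.length ≤ k.toNat)
    (hsort : buf.Pairwise (fun a b => a.2 ≤ b.2)) :
    pyB_insTrim k buf i v = (PySem.List.insertBy pvBf (i, v) buf).take k.toNat := by
  unfold pyB_insTrim
  by_cases hg : ((buf.length : Int) == k && decide ((PySem.List.pyGetD buf (k - 1) (0, 0)).2 ≤ v)) = true
  · rw [if_pos hg]
    rw [Bool.and_eq_true, beq_iff_eq, decide_eq_true_eq] at hg
    obtain ⟨h1, h2⟩ := hg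
    have hKpos : 0 < buf.length := by omega
    have hget : PySem.List.pyGetD buf (k - 1) (0, 0) = buf[buf.length - 1] := by
      rw [PySem.List.pyGetD_eq_getElem buf (0,0) (by omega) (by omega)]
      congr 1; omega
    have hlast : ∀ y ∈ buf, y.2 ≤ buf[buf.length - 1].2 := by
      intro y hy
      obtain ⟨jy, hjy, rfl⟩ := List.getElem_of_mem hy
      rcases Nat.lt_or_ge jy (buf.length - 1) with hlt | hge
      · exact (List.pairwise_iff_getElem.1 hsort) jy (buf.length - 1) hjy (by omega) hlt
      · have : jy = buf.length - 1 := by omega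
        subst this; exact le_refl _
    have hnb : ∀ y ∈ buf, pvBf (i, v) y = false := by
      intro y hy
      have := hlast y hy
      rw [hget] at h2
      simp [pvBf]; omega
    rw [PySem.List.insertBy_of_forall_not_before _ _ _ hnb]
    have : k.toNat = buf.length := by omega
    rw [this, List.take_left]
  · rw [if_neg hg]
    simp only []
    have htw : PySem.List.slice buf none (some ((buf.takeWhile (fun p => p.2 ≤ v)).length : Int))
        = buf.takeWhile (fun p => p.2 ≤ v) := by
      rw [PySem.List.slice_to buf (by positivity)]
      rw [Int.toNat_natCast]
      exact (List.prefix_iff_eq_take.1 (List.takeWhile_prefix _)).symm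
    have hdw : PySem.List.slice buf (some ((buf.takeWhile (fun p => p.2 ≤ v)).length : Int)) none
        = buf.dropWhile (fun p => p.2 ≤ v) := by
      rw [PySem.List.slice_from buf (by positivity), Int.toNat_natCast]
      nth_rewrite 2 [← List.takeWhile_append_dropWhile (p := fun p => p.2 ≤ v) (l := buf)]
      rw [List.drop_left]
    rw [htw, hdw, PySem.List.slice_to _ (by omega)]
    rw [pv_insertBy_eq_takeWhile]

theorem pv_sorted_snoc (pre : List (Int × Int)) (x : Int × Int) :
    PySem.List.sorted (pre ++ [x]) pvKey false =
      PySem.List.insertBy pvBf x (PySem.List.sorted pre pvKey false) := by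
  rw [PySem.List.sorted_eq_foldl_insertBy, PySem.List.sorted_eq_foldl_insertBy,
    List.foldl_append]
  rfl

theorem pv_sel_eq (k : Int) (hk : 1 ≤ k) (xs : List (Int × Int)) :
    ∀ pre : List (Int × Int),
    xs.foldl (fun buf p => pyB_insTrim k buf p.1 p.2)
        ((PySem.List.sorted pre pvKey false).take k.toNat) =
      (PySem.List.sorted (pre ++ xs) pvKey false).take k.toNat := by
  induction xs with
  | nil => intro pre; simp
  | cons x t ih =>
    intro pre
    rw [List.foldl_cons]
    have hstep : pyB_insTrim k ((PySem.List.sorted pre pvKey false).take k.toNat) x.1 x.2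
        = (PySem.List.sorted (pre ++ [x]) pvKey false).take k.toNat := by
      rw [pv_insTrim_eq k _ x.1 x.2 hk (by simp)
        ((PySem.List.sorted_pairwise pre pvKey).sublist (List.take_sublist _ _))]
      rw [Prod.mk.eta, pv_take_insertBy, pv_sorted_snoc]
    rw [hstep, ih (pre ++ [x])]
    simp

theorem pv_selB_eq (k : Int) (hk : 1 ≤ k) (timers : List Int) :
    pyB_sel k timers =
      (PySem.List.sorted (PySem.List.enumerate timers) pvKey false).take k.toNat := by
  have h0 : (PySem.List.sorted ([] : List (Int × Int)) pvKey false) = [] := rfl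
  have := pv_sel_eq k hk (PySem.List.enumerate timers) []
  rw [h0] at this
  simpa [pyB_sel] using this

theorem pv_max_eq_last (buf : List (Int × Int)) (hne : buf ≠ [])
    (hsort : buf.Pairwise (fun a b => a.2 ≤ b.2)) :
    PySem.List.max? (buf.map (fun p => p.2)) (fun v => v) =
      (PySem.List.pyGet? buf (-1)).map (fun p => p.2) := by
  rw [PySem.List.pyGet?_neg_one, List.getLast?_eq_some_getLast hne]
  have hmapne : buf.map (fun p => p.2) ≠ [] := by simpa using hne
  obtain ⟨mv, hmv⟩ : ∃ mv, PySem.List.max? (buf.map (fun p => p.2)) (fun v => v) = some mv := by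
    cases h : PySem.List.max? (buf.map (fun p => p.2)) (fun v => v) with
    | none => exact absurd ((PySem.List.max?_eq_none_iff _ _).1 h) hmapne
    | some mv => exact ⟨mv, rfl⟩
  rw [hmv]
  have hlastmem : (buf.getLast hne).2 ∈ buf.map (fun p => p.2) :=
    List.mem_map_of_mem (List.getLast_mem hne)
  have h1 : (buf.getLast hne).2 ≤ mv := PySem.List.max?_isMax hmv _ hlastmem
  have h2 : mv ≤ (buf.getLast hne).2 := by
    obtain ⟨p, hp, rfl⟩ := List.mem_map.1 (PySem.List.max?_mem hmv)
    obtain ⟨jp, hjp, rfl⟩ := List.getElem_of_mem hp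
    rw [List.getLast_eq_getElem]
    rcases Nat.lt_or_ge jp (buf.length - 1) with hlt | hge
    · exact (List.pairwise_iff_getElem.1 hsort) jp (buf.length - 1) hjp (by omega) hlt
    · have : jp = buf.length - 1 := by omega
      subst this; exact le_refl _
  simp only [Option.map_some]
  exact congrArg some (le_antisymm h2 h1)

theorem pv_countP_set (cs : List Int) (j : Nat) (hj : j < cs.length) (w : Int)
    (p : Int → Bool) :
    (cs.set j w).countP p + (if p (cs.getD j 0) then 1 else 0) = cs.countP p + (if p w then 1 else 0) := by
  induction cs generalizing j with
  | nil => simp at hj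
  | cons a t ih =>
    cases j with
    | zero => simp [List.countP_cons]; omega
    | succ j' =>
      have := ih j' (by simpa using hj)
      simp only [List.set_cons_succ, List.countP_cons, List.getD_cons_succ]
      omega

theorem pv_inner_eq (ts : List Int) (maxv : Int) (sel : List (Int × Int)) :
    ∀ (t cs : List Int) (z : Int),
    (∀ p ∈ sel, 0 ≤ p.1 ∧ p.1 < (cs.length : Int)) →
    (∀ x ∈ cs, 0 ≤ x) →
    z = (cs.countP (fun x => x == 0) : Int) →
    (pyA_inner ts maxv (sel.map (fun p => (p.2, p.1))) t cs).1 =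
        (pyB_inner ts maxv sel t cs z).1 ∧
    (pyA_inner ts maxv (sel.map (fun p => (p.2, p.1))) t cs).2.1 =
        (pyB_inner ts maxv sel t cs z).2.1 ∧
    (pyA_inner ts maxv (sel.map (fun p => (p.2, p.1))) t cs).2.2 =
        (pyB_inner ts maxv sel t cs z).2.2.2 ∧
    ((pyA_inner ts maxv (sel.map (fun p => (p.2, p.1))) t cs).2.2 = false →
      ((pyA_inner ts maxv (sel.map (fun p => (p.2, p.1))) t cs).1.length = t.length ∧
       (pyA_inner ts maxv (sel.map (fun p => (p.2, p.1))) t cs).2.1.length = cs.length ∧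
       (∀ x ∈ (pyA_inner ts maxv (sel.map (fun p => (p.2, p.1))) t cs).2.1, 0 ≤ x) ∧
       (pyB_inner ts maxv sel t cs z).2.2.1 =
         ((pyA_inner ts maxv (sel.map (fun p => (p.2, p.1))) t cs).2.1.countP
           (fun x => x == 0) : Int))) := by
  induction sel with
  | nil =>
    intro t cs z _ hnn hz
    exact ⟨rfl, rfl, rfl, fun _ => ⟨rfl, rfl, hnn, hz⟩⟩
  | cons q rest ih =>
    intro t cs z hrange hnn hz
    obtain ⟨i, v⟩ := q
    have hir := hrange (i, v) (List.mem_cons_self)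
    simp only at hir
    have hi0 : 0 ≤ i := hir.1
    have hilt : i.toNat < cs.length := by omega
    have hgetc : PySem.List.pyGetD cs i 0 = cs.getD i.toNat 0 := by
      rw [PySem.List.pyGetD_eq_getElem cs 0 hi0 (by omega)]
      rw [List.getD_eq_getElem cs 0 hilt]
    have hgd : cs.getD i.toNat 0 = cs[i.toNat] := List.getD_eq_getElem cs 0 hilt
    have hcv_nn : 0 ≤ cs.getD i.toNat 0 := by rw [hgd]; exact hnn _ (List.getElem_mem hilt)
    -- counts after the increment
    have hcount := pv_countP_set cs i.toNat hilt (cs.getD i.toNat 0 + 1) (fun x => x == 0)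
    have hnew0 : ((cs.getD i.toNat 0 + 1 : Int) == 0) = false := by
      rw [beq_eq_false_iff_ne]
      omega
    rw [hnew0] at hcount
    simp only [Bool.false_eq_true, if_false, Nat.add_zero] at hcount
    -- the same branch is taken
    set cs1 := cs.set i.toNat (PySem.List.pyGetD cs i 0 + 1) with hcs1
    have hcs1' : cs1 = cs.set i.toNat (cs.getD i.toNat 0 + 1) := by rw [hcs1, hgetc]
    have hz1 : (if PySem.List.pyGetD cs i 0 == 0 then z - 1 else z)
        = (cs1.countP (fun x => x == 0) : Int) := by
      rw [hgetc, hcs1']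
      by_cases h0 : cs.getD i.toNat 0 = 0
      · simp only [h0, beq_self_eq_true, if_true, hz]
        have hge : cs.countP (fun x => x == 0) ≠ 0 := by
          simp only [ne_eq, List.countP_eq_zero]
          intro h
          exact absurd h0 (by simpa using h (cs.getD i.toNat 0) (by rw [hgd]; exact List.getElem_mem hilt))
        simp only [h0, beq_self_eq_true, if_true, zero_add] at hcount ⊢
        omega
      · have : ((cs.getD i.toNat 0) == 0) = false := by rw [beq_eq_false_iff_ne]; exact h0
        rw [this] at hcount ⊢
        simp only [Bool.false_eq_true, if_false, Nat.add_zero, hz] at hcount ⊢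
        omega
    have hall : (cs1.all (fun counter => counter != 0))
        = ((if PySem.List.pyGetD cs i 0 == 0 then z - 1 else z) == 0) := by
      rw [hz1]
      by_cases hac : cs1.countP (fun x => x == 0) = 0
      · have : cs1.all (fun counter => counter != 0) = true := by
          rw [List.all_eq_true]
          intro x hx
          have := List.countP_eq_zero.1 hac x hx
          simpa using this
        rw [this, hac]
        simp
      · have : cs1.all (fun counter => counter != 0) = false := by
          by_contra hcon
          have : cs1.all (fun counter => counter != 0) = true := by
            cases h : cs1.all (fun counter => counter != 0)
            · exact absurd h hcon
            · rfl
          rw [List.all_eq_true] at this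
          have : cs1.countP (fun x => x == 0) = 0 := by
            rw [List.countP_eq_zero]
            intro x hx
            have := this x hx
            simpa using this
          exact hac this
        rw [this]
        have : ((cs1.countP (fun x => x == 0) : Int) == 0) = false := by
          rw [beq_eq_false_iff_ne]
          omega
        rw [this]
    -- now unfold one step of both
    simp only [List.map_cons, pyA_inner, pyB_inner]
    rw [hall]
    by_cases hstop : ((if PySem.List.pyGetD cs i 0 == 0 then z - 1 else z) == 0) = true
    · rw [hstop]
      simp only [if_true]
      refine ⟨trivial, ?_, trivial, ?_⟩
      · apply List.map_congr_left
        intro p _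
        by_cases hpi : p.1 = i
        · simp [hpi]
        · simp [hpi]
      · intro hfalse
        simp at hfalse
    · have hstop' : ((if PySem.List.pyGetD cs i 0 == 0 then z - 1 else z) == 0) = false := by
        cases h : ((if PySem.List.pyGetD cs i 0 == 0 then z - 1 else z) == 0)
        · rfl
        · exact absurd h hstop
      rw [hstop']
      simp only [if_false, Bool.false_eq_true]
      have htimer : v + (maxv - v) + PySem.List.pyGetD ts i 0 = maxv + PySem.List.pyGetD ts i 0 := by ring_nf
      rw [htimer]
      have hreceq : ∀ p ∈ rest, 0 ≤ p.1 ∧ p.1 < (cs1.length : Int) := by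
        intro p hp
        have := hrange p (List.mem_cons_of_mem _ hp)
        simpa [hcs1] using this
      have hrecnn : ∀ x ∈ cs1, 0 ≤ x := by
        intro x hx
        rcases List.mem_or_eq_of_mem_set hx with h | h
        · exact hnn x h
        · rw [h, hgetc]; omega
      have := ih (t.set i.toNat (maxv + PySem.List.pyGetD ts i 0)) cs1
        (if PySem.List.pyGetD cs i 0 == 0 then z - 1 else z) hreceq hrecnn hz1
      refine ⟨this.1, this.2.1, this.2.2.1, ?_⟩
      intro hnostop
      have h4 := this.2.2.2 hnostop
      refine ⟨by rw [h4.1]; simp, by rw [h4.2.1]; simp [hcs1], h4.2.2.1, h4.2.2.2⟩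


-- insertBy splits at the run of elements with value ≤ v
-- trimming before inserting does not change the trimmed result
-- one insert_trim step = insert into the buffer, then trim
-- the whole selection pass = first k of the stable sort
-- in a value-sorted nonempty list, Python's max of the values is the last value
-- counting under a set
-- inner-loop lockstep: same timers, counters and stop flag; B's zero count stays exact
-- outer lockstep
theorem pv_loop_eq (ts : List Int) (m : Int) (hm : 1 ≤ m) (hne : ts ≠ []) :
    ∀ (fuel : Nat) (tm cs : List Int) (z : Int),
    tm.length = ts.length → cs.length = ts.length → (∀ x ∈ cs, 0 ≤ x) →
    z = (cs.countP (fun x => x == 0) : Int) →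
    pyA_loop ts m fuel tm cs =
      pyB_loop ts (if m < (ts.length : Int) then m else (ts.length : Int)) fuel tm cs z := by
  intro fuel
  induction fuel with
  | zero => intro tm cs z _ _ _ _; rfl
  | succ fuel ih =>
    intro tm cs z ht hc hnn hz
    have hn : 1 ≤ ts.length := List.length_pos_of_ne_nil hne
    have hn' : (1 : Int) ≤ (ts.length : Int) := by exact_mod_cast hn
    set k : Int := if m < (ts.length : Int) then m else (ts.length : Int) with hkdef
    have hk1 : 1 ≤ k := by rw [hkdef]; split <;> omega
    have hsl : (PySem.List.sorted (PySem.List.enumerate tm) pvKey false).length = ts.length := by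
      rw [PySem.List.length_sorted, PySem.List.length_enumerate, ht]
    have hsel : PySem.List.slice
        (PySem.List.sorted (PySem.List.enumerate tm) (fun x => x.2) false) none (some m)
        = pyB_sel k tm := by
      rw [pv_selB_eq k hk1 tm, PySem.List.slice_to _ (by omega)]
      show (PySem.List.sorted (PySem.List.enumerate tm) pvKey false).take m.toNat = _
      by_cases hmn : m < (ts.length : Int)
      · rw [hkdef, if_pos hmn]
      · rw [hkdef, if_neg hmn]
        rw [List.take_of_length_le (by rw [hsl]; omega),
          List.take_of_length_le (by rw [hsl]; omega)]
    have hbuflen : 1 ≤ (pyB_sel k tm).length := by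
      rw [pv_selB_eq k hk1 tm, List.length_take, hsl]
      have : 1 ≤ k.toNat := by omega
      omega
    have hbufne : pyB_sel k tm ≠ [] := by
      intro h; rw [h] at hbuflen; simp at hbuflen
    have hpair : (pyB_sel k tm).Pairwise (fun a b => a.2 ≤ b.2) := by
      rw [pv_selB_eq k hk1 tm]
      exact (PySem.List.sorted_pairwise (PySem.List.enumerate tm) pvKey).sublist
        (List.take_sublist _ _)
    obtain ⟨last, hlast⟩ : ∃ last, PySem.List.pyGet? (pyB_sel k tm) (-1) = some last := by
      rw [PySem.List.pyGet?_neg_one]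
      exact ⟨_, List.getLast?_eq_some_getLast hbufne⟩
    have hmax : PySem.List.max? ((pyB_sel k tm).map (fun p => p.2)) (fun v => v)
        = some last.2 := by
      rw [pv_max_eq_last _ hbufne hpair, hlast, Option.map_some]
    have hbufmem : ∀ p ∈ pyB_sel k tm, 0 ≤ p.1 ∧ p.1 < (cs.length : Int) := by
      intro p hp
      have hp1 : p ∈ PySem.List.sorted (PySem.List.enumerate tm) pvKey false := by
        rw [pv_selB_eq k hk1 tm] at hp
        exact (List.take_sublist _ _).mem hp
      have hp2 : p ∈ PySem.List.enumerate tm := by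
        rw [← PySem.List.mem_sorted (key := pvKey) (rev := false)]
        exact hp1
      obtain ⟨j, hj, rfl⟩ := (PySem.List.mem_enumerate_iff tm 0 p).1 hp2
      constructor
      · simp
      · simp only [zero_add]
        rw [hc, ← ht]
        exact_mod_cast hj
    obtain ⟨e1, e2, e3, e4⟩ := pv_inner_eq ts last.2 (pyB_sel k tm) tm cs z hbufmem hnn hz
    -- unfold one step of both loops and align the selections
    simp only [pyA_loop, pyB_loop]
    simp only [pyA_mMin, hsel, hlast, hmax, List.zip_map']
    by_cases hstopA :
        (pyA_inner ts last.2 ((pyB_sel k tm).map (fun p => (p.2, p.1))) tm cs).2.2 = true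
    · have hstopB : (pyB_inner ts last.2 (pyB_sel k tm) tm cs z).2.2.2 = true := by
        rw [← e3]; exact hstopA
      simp only [hstopA, hstopB, if_true]
      rw [e1, e2]
    · have hstopA' :
          (pyA_inner ts last.2 ((pyB_sel k tm).map (fun p => (p.2, p.1))) tm cs).2.2 = false := by
        cases h : (pyA_inner ts last.2 ((pyB_sel k tm).map (fun p => (p.2, p.1))) tm cs).2.2
        · rfl
        · exact absurd h hstopA
      have hstopB : (pyB_inner ts last.2 (pyB_sel k tm) tm cs z).2.2.2 = false := by
        rw [← e3]; exact hstopA'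
      simp only [hstopA', hstopB, if_false, Bool.false_eq_true]
      obtain ⟨f1, f2, f3, f4⟩ := e4 hstopA'
      rw [← e1, ← e2, f4]
      exact ih _ _ _ (by rw [f1, ht]) (by rw [f2, hc]) f3 rfl

-- ===== VERDICT (by name: the statement is the Claim_ definition above) =====
theorem simulate_semiasynchronous_py_spec : Claim_equal_simulate_semiasynchronous_py := by
  intro ts m _hdom hpre
  obtain ⟨hne, hm, _⟩ := hpre
  unfold Spec_simulate_semiasynchronous_py
  unfold simulate_semiasynchronous_py simulate_semiasynchronous_py_alt
  have h := pv_loop_eq ts m hm hne (pvFuel ts) ts (List.replicate ts.length 0)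
    ((ts.length : Int)) rfl (by simp) (by simp)
    (by simp [List.countP_eq_length_filter])
  exact h
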